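-- pv_equiv track=rewrite | github.com/luof-508/arithmetic_repo | plugins/arithmetic/dynamic programming/word_tab.py | word_tab
-- ===== SOURCE A (Python) =====
-- def word_tab(word_lst, width):
--     m = len(word_lst)
--     word_lst.insert(0, 0)
--     dp = []
--     n = m + 1
--     dp.append([0, -1])
--     for i in range(1, n):
--         possible = {}
--         for j in range(0, i):
--             if sum(word_lst[i-1:i+1]) > width:
--                 possible[word_lst[i]**3] = i-1
--                 break
--             if sum(word_lst[j+1:i+1]) <= width:
--                 mid = dp[j][0]
--                 keys = mid + (width-sum(word_lst[j+1:i+1]))**3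
--                 possible[keys] = j
--         key = min(possible.keys())
--         value = possible[key]
--         dp.append([key, value])
--     return dp
-- ===== SOURCE B (Python) =====
-- def word_tab(word_lst, width):
--     # O(n^2): prefix sums replace each O(n) slice-sum; a running best replaces the dict+min pass.
--     m = len(word_lst)
--     word_lst.insert(0, 0)
--     pref = [0]
--     for w in word_lst:
--         pref.append(pref[-1] + w)
--     dp = [[0, -1]]
--     for i in range(1, m + 1):
--         if word_lst[i-1] + word_lst[i] > width:
--             dp.append([word_lst[i]**3, i-1])
--             continue
--         best_key = None
--         best_j = 0
--         for j in range(i):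
--             s = pref[i+1] - pref[j+1]
--             if s <= width:
--                 k = dp[j][0] + (width - s)**3
--                 if best_key is None or k <= best_key:
--                     best_key, best_j = k, j
--         dp.append([best_key, best_j])
--     return dp
-- ===== Notes on version B (the rewrite author's own statement) =====
-- stated objective: faster
-- what changed: Prefix sums computed once replace every O(n) slice-sum, the constant break-condition is hoisted out of the inner loop, and a running (best_key, best_j) scan replaces building a dict and taking min over its keys.
import Mathlib
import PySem

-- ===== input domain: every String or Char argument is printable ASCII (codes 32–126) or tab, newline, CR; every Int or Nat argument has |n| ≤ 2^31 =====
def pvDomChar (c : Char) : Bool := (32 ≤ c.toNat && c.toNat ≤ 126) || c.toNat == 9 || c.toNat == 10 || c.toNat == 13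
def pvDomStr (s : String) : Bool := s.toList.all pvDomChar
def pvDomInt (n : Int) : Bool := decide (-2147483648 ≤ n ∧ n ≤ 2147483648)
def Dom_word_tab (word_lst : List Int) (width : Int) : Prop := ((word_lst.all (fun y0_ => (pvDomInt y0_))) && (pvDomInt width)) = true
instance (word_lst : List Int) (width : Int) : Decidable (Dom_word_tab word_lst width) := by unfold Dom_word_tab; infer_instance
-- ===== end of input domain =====

-- B replaces A's O(n) slice-sums by prefix sums computed once and A's dict+min pass by a running best,
-- O(n^3) → O(n^2).  (A mutates its argument in place — word_lst.insert(0, 0) — and so does B; the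
-- equivalence proved here is about the return value.)

-- ===== PORT A =====
-- inner 'for j in range(0, i)' loop of A, with its early 'break'
def wordTabInner (wl : List Int) (width : Int) (dp : List (List Int)) (i : Int) :
    List Int → PySem.Dict Int Int → PySem.Dict Int Int
  | [], poss => poss
  | j :: rest, poss =>
    if (PySem.List.slice wl (some (i-1)) (some (i+1))).sum > width then
      poss.insert ((PySem.List.pyGetD wl i 0) ^ 3) (i-1)        -- break after this insert
    else if (PySem.List.slice wl (some (j+1)) (some (i+1))).sum ≤ width then
      let mid := PySem.List.pyGetD (PySem.List.pyGetD dp j []) 0 0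
      let key := mid + (width - (PySem.List.slice wl (some (j+1)) (some (i+1))).sum) ^ 3
      wordTabInner wl width dp i rest (poss.insert key j)
    else
      wordTabInner wl width dp i rest poss

def word_tab (word_lst : List Int) (width : Int) : List (List Int) :=
  let m : Int := word_lst.length
  let wl := PySem.List.insert word_lst 0 0
  let n := m + 1
  (PySem.List.pyRange 1 n).foldl (fun dp i =>
    let possible := wordTabInner wl width dp i (PySem.List.pyRange 0 i) PySem.Dict.empty
    match PySem.List.min? possible.keys (fun k => k) with
    | some key => dp ++ [[key, possible.getD key 0]]            -- possible[key]
    | none => dp       -- Python's min of an empty dict would raise; unreachable: possible is never empty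
  ) [[0, -1]]

-- ===== PORT B =====
-- inner 'for j in range(i)' loop of B: running (best_key, best_j)
def wordTabBest (pref : List Int) (width : Int) (dp : List (List Int)) (i : Int)
    (st : Option Int × Int) (j : Int) : Option Int × Int :=
  let s := PySem.List.pyGetD pref (i+1) 0 - PySem.List.pyGetD pref (j+1) 0
  if s ≤ width then
    let k := PySem.List.pyGetD (PySem.List.pyGetD dp j []) 0 0 + (width - s) ^ 3
    match st.1 with
    | none => (some k, j)
    | some bk => if k ≤ bk then (some k, j) else st
  else st

def word_tab_alt (word_lst : List Int) (width : Int) : List (List Int) :=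
  let m : Int := word_lst.length
  let wl := PySem.List.insert word_lst 0 0
  let pref := wl.foldl (fun p w => p ++ [PySem.List.pyGetD p (-1) 0 + w]) [(0:Int)]
  (PySem.List.pyRange 1 (m+1)).foldl (fun dp i =>
    if PySem.List.pyGetD wl (i-1) 0 + PySem.List.pyGetD wl i 0 > width then
      dp ++ [[(PySem.List.pyGetD wl i 0) ^ 3, i-1]]
    else
      let st := (PySem.List.pyRange 0 i).foldl (wordTabBest pref width dp i) (none, 0)
      match st.1 with
      | some bk => dp ++ [[bk, st.2]]
      | none => dp ++ [[0, st.2]]   -- unreachable: some j is always feasible (proved below)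
  ) [[0, -1]]

-- ===== PRECONDITION & SPEC =====
def Spec_word_tab (word_lst : List Int) (width : Int) (out : List (List Int)) : Prop := out = word_tab_alt word_lst width
instance (word_lst : List Int) (width : Int) (out : List (List Int)) : Decidable (Spec_word_tab word_lst width out) := by unfold Spec_word_tab; infer_instance

-- ===== CLAIM (what is proved, stated in full; the proofs are below) =====
def Claim_equal_word_tab : Prop := ∀ (word_lst : List Int) (width : Int), Dom_word_tab word_lst width → Spec_word_tab word_lst width (word_tab word_lst width)

-- ===== LEMMAS AND PROOFS =====

-- prefix-sum fold characterization
theorem pref_eq (l : List Int) :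
    l.foldl (fun p w => p ++ [PySem.List.pyGetD p (-1) 0 + w]) [(0:Int)]
      = (List.range (l.length+1)).map (fun k => (l.take k).sum) := by
  induction l using List.reverseRecOn with
  | nil => simp
  | append_singleton xs x ih =>
    rw [List.foldl_append, ih]
    simp only [List.foldl_cons, List.foldl_nil]
    have h1 : (List.range (xs.length+1)) = List.range xs.length ++ [xs.length] := List.range_succ
    rw [h1, List.map_append]
    simp only [List.map_cons, List.map_nil]
    rw [PySem.List.pyGetD_neg_one_append_singleton]
    have hlen : (xs ++ [x]).length + 1 = xs.length + 1 + 1 := by simp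
    have h2 : List.range (xs.length + 1 + 1) = List.range (xs.length + 1) ++ [xs.length + 1] := List.range_succ
    rw [hlen, h2, List.map_append, h1, List.map_append]
    simp only [List.map_cons, List.map_nil]
    congr 1
    · congr 1
      · apply List.map_congr_left
        intro k hk
        rw [List.mem_range] at hk
        rw [List.take_append, Nat.sub_eq_zero_of_le (by omega)]
        simp
      · rw [List.take_append, Nat.sub_eq_zero_of_le (by omega)]
        simp
    · rw [List.take_of_length_le (by simp)]
      simp

theorem take_succ_sum (l : List Int) (k : Nat) (h : k < l.length) :
    (l.take (k+1)).sum = (l.take k).sum + l[k] := by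
  rw [List.take_add_one, List.getElem?_eq_getElem h, List.sum_append]
  simp

theorem slice_sum (l : List Int) (a b : Nat) (hab : a ≤ b) :
    (PySem.List.slice l (some (a:Int)) (some (b:Int))).sum
      = (l.take b).sum - (l.take a).sum := by
  rw [PySem.List.slice_natCast]
  have : (l.take b) = l.take a ++ (l.drop a).take (b - a) := by
    rw [← List.take_add]
    congr 1
    omega
  rw [this, List.sum_append]
  ring

-- value of the prefix-sum list at a natural index
theorem pref_getD (l : List Int) (k : Nat) (hk : k ≤ l.length) :
    PySem.List.pyGetD
      (l.foldl (fun p w => p ++ [PySem.List.pyGetD p (-1) 0 + w]) [(0:Int)]) (k:Int) 0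
      = (l.take k).sum := by
  rw [pref_eq, PySem.List.pyGetD_natCast]
  rw [List.getD_eq_getElem?_getD, List.getElem?_map]
  rw [List.getElem?_range (by omega)]
  simp

-- the invariant relating A's dict to B's running best
def InvWT (poss : PySem.Dict Int Int) (st : Option Int × Int) : Prop :=
  match st.1 with
  | none => poss = PySem.Dict.empty
  | some bk => bk ∈ poss.keys ∧ (∀ y ∈ poss.keys, bk ≤ y) ∧ poss.getD bk 0 = st.2

theorem inv_foldl (S K : Int → Int) (width : Int) (js : List Int)
    (poss : PySem.Dict Int Int) (st : Option Int × Int) (h : InvWT poss st) :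
    InvWT
      (js.foldl (fun poss j => if S j ≤ width then poss.insert (K j) j else poss) poss)
      (js.foldl (fun st j => if S j ≤ width then
          (match st.1 with
           | none => (some (K j), j)
           | some bk => if K j ≤ bk then (some (K j), j) else st)
        else st) st) := by
  induction js generalizing poss st with
  | nil => exact h
  | cons j rest ih =>
    simp only [List.foldl_cons]
    apply ih
    by_cases hs : S j ≤ width
    · simp only [if_pos hs]
      match hst : st.1 with
      | none =>
        have hp : poss = PySem.Dict.empty := by unfold InvWT at h; rw [hst] at h; exact h
        subst hp
        refine ⟨?_, ?_, ?_⟩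
        · simp [PySem.Dict.mem_keys_insert]
        · intro y hy
          rcases (PySem.Dict.mem_keys_insert _ _ _ _).1 hy with h1 | h1
          · omega
          · simp [PySem.Dict.keys_empty] at h1
        · simp
      | some bk =>
        have hinv : bk ∈ poss.keys ∧ (∀ y ∈ poss.keys, bk ≤ y) ∧ poss.getD bk 0 = st.2 := by
          unfold InvWT at h; rw [hst] at h; exact h
        by_cases hk : K j ≤ bk
        · simp only [if_pos hk]
          refine ⟨?_, ?_, ?_⟩
          · simp [PySem.Dict.mem_keys_insert]
          · intro y hy
            rcases (PySem.Dict.mem_keys_insert _ _ _ _).1 hy with h1 | h1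
            · omega
            · have := hinv.2.1 y h1; omega
          · simp
        · simp only [if_neg hk]
          unfold InvWT
          rw [hst]
          refine ⟨?_, ?_, ?_⟩
          · rw [PySem.Dict.mem_keys_insert]; exact Or.inr hinv.1
          · intro y hy
            rcases (PySem.Dict.mem_keys_insert _ _ _ _).1 hy with h1 | h1
            · omega
            · exact hinv.2.1 y h1
          · rw [PySem.Dict.getD_insert]
            rw [if_neg (by omega)]
            exact hinv.2.2
    · simp only [if_neg hs]
      exact h

theorem best_isSome_preserved (S K : Int → Int) (width : Int) (js : List Int)
    (st : Option Int × Int) (h : st.1.isSome) :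
    ((js.foldl (fun st j => if S j ≤ width then
        (match st.1 with
         | none => (some (K j), j)
         | some bk => if K j ≤ bk then (some (K j), j) else st)
      else st) st).1).isSome := by
  induction js generalizing st with
  | nil => exact h
  | cons j rest ih =>
    simp only [List.foldl_cons]
    apply ih
    by_cases hs : S j ≤ width
    · simp only [if_pos hs]
      match hst : st.1 with
      | none => simp
      | some bk =>
        by_cases hk : K j ≤ bk
        · simp [if_pos hk]
        · simp only [if_neg hk]; rw [hst]; simp
    · simp only [if_neg hs]; exact h

theorem best_isSome_of_feasible (S K : Int → Int) (width : Int) (js : List Int)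
    (st : Option Int × Int) (j0 : Int) (hmem : j0 ∈ js) (hfeas : S j0 ≤ width) :
    ((js.foldl (fun st j => if S j ≤ width then
        (match st.1 with
         | none => (some (K j), j)
         | some bk => if K j ≤ bk then (some (K j), j) else st)
      else st) st).1).isSome := by
  induction js generalizing st with
  | nil => simp at hmem
  | cons j rest ih =>
    simp only [List.foldl_cons]
    rcases List.mem_cons.1 hmem with h1 | h1
    · subst h1
      apply best_isSome_preserved
      simp only [if_pos hfeas]
      match hst : st.1 with
      | none => simp
      | some bk =>
        by_cases hk : K j0 ≤ bk
        · simp [if_pos hk]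
        · simp only [if_neg hk]; rw [hst]; simp
    · exact ih _ h1
-- ===== PORT A =====
theorem inner_break (wl : List Int) (width : Int) (dp : List (List Int)) (i : Int)
    (h : (PySem.List.slice wl (some (i-1)) (some (i+1))).sum > width)
    (j : Int) (rest : List Int) (poss : PySem.Dict Int Int) :
    wordTabInner wl width dp i (j :: rest) poss
      = poss.insert ((PySem.List.pyGetD wl i 0) ^ 3) (i-1) := by
  simp [wordTabInner, h]

theorem inner_no_break (wl : List Int) (width : Int) (dp : List (List Int)) (i : Int)
    (h : ¬ ((PySem.List.slice wl (some (i-1)) (some (i+1))).sum > width))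
    (js : List Int) (poss : PySem.Dict Int Int) :
    wordTabInner wl width dp i js poss
      = js.foldl (fun poss j =>
          if (PySem.List.slice wl (some (j+1)) (some (i+1))).sum ≤ width then
            poss.insert (PySem.List.pyGetD (PySem.List.pyGetD dp j []) 0 0
              + (width - (PySem.List.slice wl (some (j+1)) (some (i+1))).sum) ^ 3) j
          else poss) poss := by
  induction js generalizing poss with
  | nil => simp [wordTabInner]
  | cons j rest ih =>
    rw [List.foldl_cons]
    by_cases hs : (PySem.List.slice wl (some (j+1)) (some (i+1))).sum ≤ width
    · rw [if_pos hs]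
      rw [← ih]
      simp [wordTabInner, h, hs]
    · rw [if_neg hs]
      rw [← ih]
      simp [wordTabInner, h, hs]

theorem word_tab_main (word_lst : List Int) (width : Int) :
    word_tab word_lst width = word_tab_alt word_lst width := by
  unfold word_tab word_tab_alt
  simp only [PySem.List.insert_zero]
  apply PySem.List.foldl_congr_mem
  intro dp i hi
  rw [PySem.List.mem_pyRange_one] at hi
  obtain ⟨a, rfl⟩ : ∃ a : Nat, i = (a:Int) := ⟨i.toNat, (Int.toNat_of_nonneg (by omega)).symm⟩
  have h1 : 1 ≤ a := by omega
  have h2 : a ≤ word_lst.length := by omega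
  set wl : List Int := (0:Int) :: word_lst with hwl
  have hwllen : wl.length = word_lst.length + 1 := by simp [hwl]
  set pref : List Int := wl.foldl (fun p w => p ++ [PySem.List.pyGetD p (-1) 0 + w]) [(0:Int)] with hpref
  have hL1 : a - 1 < wl.length := by omega
  have hL2 : a < wl.length := by omega
  -- index casts
  have hA1 : (a:Int) - 1 = ((a-1 : Nat) : Int) := by omega
  have hA2 : (a:Int) + 1 = ((a+1 : Nat) : Int) := by omega
  have hget : ∀ (k : Nat) (hk : k < wl.length), PySem.List.pyGetD wl (k:Int) 0 = wl[k]'hk := by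
    intro k hk
    rw [PySem.List.pyGetD_natCast, List.getD_eq_getElem _ _ hk]
  -- the break/continue condition of the two programs agree
  have hcond : (PySem.List.slice wl (some ((a:Int)-1)) (some ((a:Int)+1))).sum
      = PySem.List.pyGetD wl ((a:Int)-1) 0 + PySem.List.pyGetD wl (a:Int) 0 := by
    rw [hA1, hA2, slice_sum wl (a-1) (a+1) (by omega)]
    have e1 : (wl.take (a-1+1)).sum = (wl.take (a-1)).sum + wl[a-1]'hL1 :=
      take_succ_sum wl (a-1) hL1
    have e2 : (wl.take (a+1)).sum = (wl.take a).sum + wl[a]'hL2 :=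
      take_succ_sum wl a hL2
    have e3 : a - 1 + 1 = a := by omega
    rw [e3] at e1
    rw [hget (a-1) hL1, hget a hL2]
    omega
  by_cases hc : (PySem.List.pyGetD wl ((a:Int)-1) 0 + PySem.List.pyGetD wl (a:Int) 0) > width
  · -- break case
    rw [PySem.List.pyRange_one_cons (by omega : (0:Int) < (a:Int))]
    rw [inner_break wl width dp _ (by rw [hcond]; exact hc)]
    rw [if_pos hc]
    rw [PySem.Dict.keys_insert_of_not_contains _ _ (PySem.Dict.contains_empty _)]
    rw [PySem.Dict.keys_empty, List.nil_append, PySem.List.min?_id_cons]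
    simp
  · -- no-break case
    rw [if_neg hc]
    set S : Int → Int := fun j => PySem.List.pyGetD pref ((a:Int)+1) 0 - PySem.List.pyGetD pref (j+1) 0 with hS
    set K : Int → Int := fun j => PySem.List.pyGetD (PySem.List.pyGetD dp j []) 0 0 + (width - S j)^3 with hK
    -- slice sums = prefix differences, for j in range
    have hpref_getD : ∀ k : Nat, k ≤ wl.length → PySem.List.pyGetD pref (k:Int) 0 = (wl.take k).sum := by
      intro k hk
      rw [hpref]
      exact pref_getD wl k hk
    have hsum : ∀ j : Int, 0 ≤ j → j < (a:Int) →
        (PySem.List.slice wl (some (j+1)) (some ((a:Int)+1))).sum = S j := by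
      intro j hj0 hja
      obtain ⟨jn, rfl⟩ : ∃ jn : Nat, j = (jn:Int) := ⟨j.toNat, (Int.toNat_of_nonneg hj0).symm⟩
      have hBc : (jn:Int) + 1 = ((jn+1 : Nat) : Int) := by omega
      simp only [hS]
      rw [hBc, hA2, slice_sum wl (jn+1) (a+1) (by omega)]
      rw [hpref_getD (jn+1) (by omega), hpref_getD (a+1) (by omega)]
    -- A's inner loop as a fold with S/K
    rw [inner_no_break wl width dp (a:Int) (by rw [hcond]; exact hc)]
    rw [PySem.List.foldl_congr_mem _ _
      (fun poss j => if S j ≤ width then poss.insert (K j) j else poss) _ ?_]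
    swap
    · intro poss j hj
      rw [PySem.List.mem_pyRange_one] at hj
      rw [hsum j hj.1 hj.2]
    -- B's inner loop is the generic best fold
    have hB : wordTabBest pref width dp (a:Int) = (fun st j => if S j ≤ width then
        (match st.1 with
         | none => (some (K j), j)
         | some bk => if K j ≤ bk then (some (K j), j) else st)
      else st) := by
      funext st j
      rfl
    rw [hB]
    -- the final best is some: witness j0 = a-2 (0 when a = 1)
    have hfeas : S ((a-2 : Nat) : Int) ≤ width := by
      rw [hA1, hget (a-1) hL1, hget a hL2] at hc
      have e2 := take_succ_sum wl a hL2
      have e1 := take_succ_sum wl (a-1) hL1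
      have e3 : a - 1 + 1 = a := by omega
      rw [e3] at e1
      have hstep : PySem.List.pyGetD pref (((a-2:Nat):Int)+1) 0 = (wl.take (a-1)).sum := by
        by_cases ha1 : a = 1
        · have hc1 : ((a-2:Nat):Int) + 1 = ((1:Nat):Int) := by omega
          rw [hc1, hpref_getD 1 (by omega)]
          subst ha1
          simp [hwl]
        · have hc2 : ((a-2:Nat):Int) + 1 = ((a-1:Nat):Int) := by omega
          rw [hc2, hpref_getD (a-1) (by omega)]
      simp only [hS]
      rw [hstep, hA2, hpref_getD (a+1) (by omega)]
      omega
    have hmem : ((a-2 : Nat) : Int) ∈ PySem.List.pyRange 0 (a:Int) := by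
      rw [PySem.List.mem_pyRange_one]
      omega
    have hsome := best_isSome_of_feasible S K width (PySem.List.pyRange 0 (a:Int)) (none, 0) _ hmem hfeas
    obtain ⟨bk, hbk⟩ := Option.isSome_iff_exists.1 hsome
    have hinv := inv_foldl S K width (PySem.List.pyRange 0 (a:Int)) PySem.Dict.empty (none, 0) (by unfold InvWT; rfl)
    unfold InvWT at hinv
    rw [hbk] at hinv
    obtain ⟨hmemk, hmin, hgetd⟩ := hinv
    -- A's min over the dict keys is bk
    have hne : (List.foldl (fun poss j => if S j ≤ width then poss.insert (K j) j else poss)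
        PySem.Dict.empty (PySem.List.pyRange 0 (a:Int))).keys ≠ [] := by
      intro h
      rw [h] at hmemk
      simp at hmemk
    obtain ⟨y, hy⟩ : ∃ y, PySem.List.min? (List.foldl (fun poss j => if S j ≤ width then poss.insert (K j) j else poss)
        PySem.Dict.empty (PySem.List.pyRange 0 (a:Int))).keys (fun k => k) = some y := by
      cases hmq : PySem.List.min? (List.foldl (fun poss j => if S j ≤ width then poss.insert (K j) j else poss)
        PySem.Dict.empty (PySem.List.pyRange 0 (a:Int))).keys (fun k => k) with
      | none => exact absurd ((PySem.List.min?_eq_none_iff _ _).1 hmq) hne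
      | some y => exact ⟨y, rfl⟩
    have hymem := PySem.List.min?_mem hy
    have hybk : y = bk := le_antisymm (PySem.List.min?_isMin hy bk hmemk) (hmin y hymem)
    rw [hy, hybk, hbk]
    simp only [hgetd]

-- ===== VERDICT (by name: the statement is the Claim_ definition above) =====
theorem word_tab_spec : Claim_equal_word_tab := by
  intro word_lst width _
  exact word_tab_main word_lst width
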